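-- pv_equiv track=rewrite | github.com/rjuchnicki/adventofcode2025 | day4.py | part1
-- ===== SOURCE A (Python) =====
-- DIRS: list[tuple[int, int]] = [
--     (-1, -1),
--     (-1, 0),
--     (-1, 1),
--     (0, -1),
--     (0, 1),
--     (1, -1),
--     (1, 0),
--     (1, 1),
-- ]
--
-- def is_accessible(grid: list[list[str]], i: int, j: int) -> bool:
--     adjacent = 0
--     for di, dj in DIRS:
--         new_i = i + di
--         new_j = j + dj
--         if (
--             0 <= new_i < len(grid)
--             and 0 <= new_j < len(grid[0])
--             and grid[new_i][new_j] == "@"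
--         ):
--             adjacent += 1
--
--     if adjacent < 4:
--         return True
--
--     return False
--
-- def part1(grid: list[list[str]]) -> int:
--     accessible = 0
--     for i in range(len(grid)):
--         for j in range(len(grid[0])):
--             if grid[i][j] == ".":
--                 continue
--
--             if is_accessible(grid, i, j):
--                 accessible += 1
--
--     return accessible
-- ===== SOURCE B (Python) =====
-- DIRS: list[tuple[int, int]] = [
--     (-1, -1),
--     (-1, 0),
--     (-1, 1),
--     (0, -1),
--     (0, 1),
--     (1, -1),
--     (1, 0),
--     (1, 1),
-- ]
--
-- def part1(grid: list[list[str]]) -> int: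
--     if not grid:
--         return 0
--     rows, cols = len(grid), len(grid[0])
--     # Scatter: every '@' cell adds 1 to each in-bounds neighbor position.
--     targets = [
--         (i + di, j + dj)
--         for i in range(rows)
--         for j in range(cols)
--         if grid[i][j] == "@"
--         for di, dj in DIRS
--         if 0 <= i + di < rows and 0 <= j + dj < cols
--     ]
--     counts = {}
--     for p in targets:
--         counts[p] = counts.get(p, 0) + 1
--     return sum(
--         1
--         for i in range(rows)
--         for j in range(cols)
--         if grid[i][j] != "." and counts.get((i, j), 0) < 4
--     )
-- ===== Notes on version B (the rewrite author's own statement) =====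
-- stated objective: faster
-- what changed: A gathers: for every cell it scans all 8 directions (through a per-cell Python function call) to count adjacent '@'; B scatters: one comprehension pass in which every '@' cell emits its in-bounds neighbour positions into a counter dict, then one tally pass over cells that are not '.', relying on DIRS being closed under negation.
import Mathlib
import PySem

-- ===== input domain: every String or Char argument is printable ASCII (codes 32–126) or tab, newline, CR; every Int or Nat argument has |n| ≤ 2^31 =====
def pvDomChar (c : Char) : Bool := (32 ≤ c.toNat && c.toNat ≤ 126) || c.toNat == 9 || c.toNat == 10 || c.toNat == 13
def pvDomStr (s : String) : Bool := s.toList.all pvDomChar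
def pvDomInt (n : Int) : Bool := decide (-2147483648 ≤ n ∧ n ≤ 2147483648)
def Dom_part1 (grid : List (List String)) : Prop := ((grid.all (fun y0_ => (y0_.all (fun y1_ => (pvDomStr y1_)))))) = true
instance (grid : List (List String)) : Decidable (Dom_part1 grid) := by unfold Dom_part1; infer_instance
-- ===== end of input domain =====

-- B replaces A's per-cell gather over DIRS by one scatter pass (every '@' cell adds 1 to each
-- in-bounds neighbour position in a counter dict) and one tally pass; return values only,
-- neither program mutates its argument.

-- ===== PORT A =====
def pvDirs : List (Int × Int) :=
  [(-1,-1),(-1,0),(-1,1),(0,-1),(0,1),(1,-1),(1,0),(1,1)]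

-- grid[i][j] for indices the surrounding bounds checks have already validated
def pvCell (grid : List (List String)) (i j : Int) : String :=
  PySem.List.pyGetD (PySem.List.pyGetD grid i []) j ""

def isAccessible (grid : List (List String)) (i j : Int) : Bool :=
  let adjacent : Int := pvDirs.foldl (fun adj d =>
    if 0 ≤ i + d.1 ∧ i + d.1 < (grid.length : Int) ∧
       0 ≤ j + d.2 ∧ j + d.2 < ((PySem.List.pyGetD grid 0 []).length : Int) ∧
       pvCell grid (i + d.1) (j + d.2) = "@"
    then adj + 1 else adj) 0
  decide (adjacent < 4)

def part1 (grid : List (List String)) : Int :=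
  (PySem.List.pyRange 0 (grid.length : Int) 1).foldl (fun acc i =>
    (PySem.List.pyRange 0 ((PySem.List.pyGetD grid 0 []).length : Int) 1).foldl (fun acc j =>
      if pvCell grid i j = "." then acc
      else if isAccessible grid i j then acc + 1 else acc) acc) 0

-- ===== PORT B =====
-- the list comprehension of Source B: every in-bounds neighbour position of every '@' cell
def pvTargets (grid : List (List String)) (rows cols : Int) : List (Int × Int) :=
  (PySem.List.pyRange 0 rows 1).flatMap (fun i =>
    (PySem.List.pyRange 0 cols 1).flatMap (fun j =>
      if pvCell grid i j = "@" then
        (pvDirs.filter (fun d =>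
          decide (0 ≤ i + d.1 ∧ i + d.1 < rows ∧ 0 ≤ j + d.2 ∧ j + d.2 < cols))).map
          (fun d => (i + d.1, j + d.2))
      else []))

def part1_alt (grid : List (List String)) : Int :=
  if grid = [] then 0
  else
    let rows : Int := (grid.length : Int)
    let cols : Int := ((PySem.List.pyGetD grid 0 []).length : Int)
    let counts : PySem.Dict (Int × Int) Int :=
      (pvTargets grid rows cols).foldl (fun d p => d.insert p (d.getD p 0 + 1)) PySem.Dict.empty
    ((PySem.List.pyRange 0 rows 1).map (fun i =>
      ((PySem.List.pyRange 0 cols 1).map (fun j =>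
        if pvCell grid i j ≠ "." ∧ counts.getD (i, j) 0 < 4 then (1 : Int) else 0)).sum)).sum

-- ===== PRECONDITION & SPEC =====
-- Pre_ excludes exactly the ragged grids on which Python A raises IndexError (a row shorter
-- than row 0, indexed at a column only row 0 has); B raises the same IndexError there.
def Pre_part1 (grid : List (List String)) : Prop :=
  ∀ row ∈ grid, (PySem.List.pyGetD grid 0 []).length ≤ row.length
instance (grid : List (List String)) : Decidable (Pre_part1 grid) := by unfold Pre_part1; infer_instance

def pvWitness_part1 : List (List String) := [["@", "."], [".", "@"]]

def Spec_part1 (grid : List (List String)) (out : Int) : Prop := out = part1_alt grid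
instance (grid : List (List String)) (out : Int) : Decidable (Spec_part1 grid out) := by unfold Spec_part1; infer_instance

-- ===== CLAIM (what is proved, stated in full; the proofs are below) =====
def Claim_equal_part1 : Prop := ∀ (grid : List (List String)), Dom_part1 grid → Pre_part1 grid → Spec_part1 grid (part1 grid)

-- ===== LEMMAS AND PROOFS =====

-- A's neighbour test for cell (i,j) against direction d, as a Bool predicate
def pvAdjP (grid : List (List String)) (rows cols i j : Int) : (Int × Int) → Bool :=
  fun d => decide (0 ≤ i + d.1 ∧ i + d.1 < rows ∧ 0 ≤ j + d.2 ∧ j + d.2 < cols ∧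
    pvCell grid (i + d.1) (j + d.2) = "@")

-- counting occurrences in a flatMap, summand by summand
theorem pv_count_flatMap {α : Type} (l : List α) (g : α → List (Int × Int)) (p : Int × Int) :
    (l.flatMap g).count p = (l.map (fun x => (g x).count p)).sum := by
  induction l with
  | nil => simp
  | cons a t ih => simp [List.count_append, ih]

-- swapping a double list sum (Nat)
theorem pv_sum_swap {α β : Type} (l : List α) (m : List β) (f : α → β → Nat) :
    (l.map (fun x => (m.map (fun y => f x y)).sum)).sum
      = (m.map (fun y => (l.map (fun x => f x y)).sum)).sum := by
  induction l with
  | nil => simp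
  | cons a t ih => simp [ih, List.sum_map_add]

-- a sum over a range whose summand pins the index to one value
theorem pv_sum_pin (C b : Int) (Q : Int → Prop) [DecidablePred Q] :
    ((PySem.List.pyRange 0 C 1).map (fun j => if j = b ∧ Q j then (1 : Nat) else 0)).sum
      = if 0 ≤ b ∧ b < C ∧ Q b then 1 else 0 := by
  have hs : ((PySem.List.pyRange 0 C 1).map (fun j => if j = b ∧ Q j then (1 : Nat) else 0)).sum
      = (PySem.List.pyRange 0 C 1).countP (fun j => decide (j = b ∧ Q j)) := by
    induction (PySem.List.pyRange 0 C 1) with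
    | nil => simp
    | cons a t ih => by_cases h : a = b ∧ Q a <;> simp [h, ih, List.countP_cons] <;> omega
  rw [hs]
  by_cases hQ : Q b
  · have hcnt : (PySem.List.pyRange 0 C 1).countP (fun j => decide (j = b ∧ Q j))
        = (PySem.List.pyRange 0 C 1).count b := by
      rw [List.count_eq_countP]
      exact List.countP_congr (by intro x hx; constructor <;> intro h <;> simp_all)
    rw [hcnt]
    by_cases hb : 0 ≤ b ∧ b < C
    · rw [List.count_eq_one_of_mem (PySem.List.nodup_pyRange_one 0 C)
        (PySem.List.mem_pyRange_one.mpr ⟨hb.1, hb.2⟩)]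
      simp [hb, hQ]
    · rw [List.count_eq_zero_of_not_mem
        (by intro hm; exact hb (by simpa [PySem.List.mem_pyRange_one] using hm))]
      simp; omega
  · rw [List.countP_eq_zero.mpr (by intro x hx; simp; intro h; subst h; exact fun q => hQ q)]
    simp [hQ]

-- membership of (u,v) in a duplicate-free list split into pinned indicators
theorem pv_mem_split (P : Prop) [Decidable P] (u v : Int) (l : List (Int × Int)) (hl : l.Nodup) :
    (if P ∧ (u, v) ∈ l then (1 : Nat) else 0)
      = (l.map (fun d => if P ∧ u = d.1 ∧ v = d.2 then (1 : Nat) else 0)).sum := by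
  induction l with
  | nil => simp
  | cons a t ih =>
    have hna : a ∉ t := (List.nodup_cons.mp hl).1
    have iht := ih (List.nodup_cons.mp hl).2
    by_cases hP : P
    · by_cases h1 : (u, v) = a
      · have h2 : (u, v) ∉ t := h1 ▸ hna
        have hsum : (List.map (fun d => if P ∧ u = d.1 ∧ v = d.2 then (1 : Nat) else 0) t).sum = 0 := by
          rw [← iht]; simp [h2]
        subst h1
        simp [hP] at hsum ⊢
        simp [hsum]
      · have hm : ((u, v) ∈ a :: t) ↔ ((u, v) ∈ t) := by simp [List.mem_cons, h1]
        have hne : ¬(u = a.1 ∧ v = a.2) := by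
          intro ⟨e1, e2⟩; exact h1 (Prod.ext e1 e2)
        simp only [List.map, List.sum_cons, hm, if_neg (by tauto : ¬(P ∧ u = a.1 ∧ v = a.2))]
        rw [iht]; omega
    · simp [hP]

theorem pv_dirs_split (P : Prop) [Decidable P] (u v : Int) :
    (if P ∧ (u, v) ∈ pvDirs then (1 : Nat) else 0)
      = (pvDirs.map (fun d => if P ∧ u = d.1 ∧ v = d.2 then (1 : Nat) else 0)).sum :=
  pv_mem_split P u v pvDirs (by decide)

-- countP over a list as a 0/1 sum (Nat)
theorem pv_countP_eq_sum {α : Type} (l : List α) (p : α → Bool) :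
    (l.map (fun d => if p d = true then (1 : Nat) else 0)).sum = l.countP p := by
  induction l with
  | nil => simp
  | cons a t ih => by_cases h : p a <;> simp [h, ih, List.countP_cons] <;> omega

-- the direction list is closed under negation: reflecting a summand leaves its sum unchanged
theorem pv_sum_neg_dirs (f : Int × Int → Nat) :
    (pvDirs.map (fun d => f (-d.1, -d.2))).sum = (pvDirs.map f).sum := by
  simp only [pvDirs, List.map, List.sum_cons, List.sum_nil]
  norm_num
  ac_rfl

-- the count of the scatter hits landing in one inner cell of one source cell
theorem pv_inner_count (grid : List (List String)) (rows cols x y i j : Int)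
    (hx0 : 0 ≤ x) (hx1 : x < rows) (hy0 : 0 ≤ y) (hy1 : y < cols) :
    ((if pvCell grid i j = "@" then
        (pvDirs.filter (fun d =>
          decide (0 ≤ i + d.1 ∧ i + d.1 < rows ∧ 0 ≤ j + d.2 ∧ j + d.2 < cols))).map
          (fun d => (i + d.1, j + d.2))
      else []).count (x, y))
      = if pvCell grid i j = "@" ∧ (x - i, y - j) ∈ pvDirs then 1 else 0 := by
  by_cases hc : pvCell grid i j = "@"
  · have hinj : Function.Injective (fun d : Int × Int => (i + d.1, j + d.2)) := by
      rintro ⟨a1, a2⟩ ⟨b1, b2⟩ h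
      simp only [Prod.mk.injEq] at h ⊢
      omega
    have hstep : ((pvDirs.filter (fun d =>
          decide (0 ≤ i + d.1 ∧ i + d.1 < rows ∧ 0 ≤ j + d.2 ∧ j + d.2 < cols))).map
          (fun d => (i + d.1, j + d.2))).count (x, y)
        = (pvDirs.filter (fun d =>
          decide (0 ≤ i + d.1 ∧ i + d.1 < rows ∧ 0 ≤ j + d.2 ∧ j + d.2 < cols))).count (x - i, y - j) := by
      have hxy : ((x, y) : Int × Int)
          = (fun d : Int × Int => (i + d.1, j + d.2)) (x - i, y - j) := by
        simp only [Prod.mk.injEq]; constructor <;> omega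
      rw [hxy]
      exact List.count_map_of_injective _ _ hinj _
    rw [if_pos hc, hstep]
    by_cases hm : ((x - i, y - j) : Int × Int) ∈ pvDirs
    · have hq : (decide (0 ≤ i + ((x - i, y - j) : Int × Int).1 ∧
          i + ((x - i, y - j) : Int × Int).1 < rows ∧
          0 ≤ j + ((x - i, y - j) : Int × Int).2 ∧
          j + ((x - i, y - j) : Int × Int).2 < cols)) = true := by
        simp only [decide_eq_true_eq]
        omega
      rw [List.count_eq_one_of_mem (List.Nodup.filter _ (by decide))
        (List.mem_filter.mpr ⟨hm, hq⟩), if_pos ⟨hc, hm⟩]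
    · rw [List.count_eq_zero_of_not_mem (fun h => hm (List.mem_of_mem_filter h)),
        if_neg (fun h => hm h.2)]
  · simp [hc]

-- the scatter/gather exchange: the number of scatter hits at (x,y) is A's gathered
-- neighbour count at (x,y), for any in-bounds (x,y)
theorem pv_core (grid : List (List String)) (rows cols x y : Int)
    (hx0 : 0 ≤ x) (hx1 : x < rows) (hy0 : 0 ≤ y) (hy1 : y < cols) :
    (pvTargets grid rows cols).count (x, y) = pvDirs.countP (pvAdjP grid rows cols x y) := by
  unfold pvTargets pvAdjP
  rw [pv_count_flatMap]
  have h1 : ∀ i : Int,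
      ((PySem.List.pyRange 0 cols 1).flatMap (fun j =>
        if pvCell grid i j = "@" then
          (pvDirs.filter (fun d =>
            decide (0 ≤ i + d.1 ∧ i + d.1 < rows ∧ 0 ≤ j + d.2 ∧ j + d.2 < cols))).map
            (fun d => (i + d.1, j + d.2))
        else [])).count (x, y)
      = (pvDirs.map (fun d =>
          ((PySem.List.pyRange 0 cols 1).map (fun j =>
            if pvCell grid i j = "@" ∧ x - i = d.1 ∧ y - j = d.2 then (1 : Nat) else 0)).sum)).sum := by
    intro i
    rw [pv_count_flatMap]
    rw [show (List.map (fun j =>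
        (if pvCell grid i j = "@" then
          (pvDirs.filter (fun d =>
            decide (0 ≤ i + d.1 ∧ i + d.1 < rows ∧ 0 ≤ j + d.2 ∧ j + d.2 < cols))).map
            (fun d => (i + d.1, j + d.2))
        else []).count (x, y)) (PySem.List.pyRange 0 cols 1))
      = List.map (fun j => (pvDirs.map (fun d =>
          if pvCell grid i j = "@" ∧ x - i = d.1 ∧ y - j = d.2 then (1 : Nat) else 0)).sum)
          (PySem.List.pyRange 0 cols 1) from
      List.map_congr_left (fun j _ => by
        rw [pv_inner_count grid rows cols x y i j hx0 hx1 hy0 hy1, pv_dirs_split])]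
    exact pv_sum_swap _ pvDirs _
  rw [List.map_congr_left (fun i _ => h1 i), pv_sum_swap]
  have h2 : ∀ d : Int × Int,
      ((PySem.List.pyRange 0 rows 1).map (fun i =>
        ((PySem.List.pyRange 0 cols 1).map (fun j =>
          if pvCell grid i j = "@" ∧ x - i = d.1 ∧ y - j = d.2 then (1 : Nat) else 0)).sum)).sum
      = if 0 ≤ x - d.1 ∧ x - d.1 < rows ∧ 0 ≤ y - d.2 ∧ y - d.2 < cols ∧
          pvCell grid (x - d.1) (y - d.2) = "@" then 1 else 0 := by
    intro d
    have hinner : ∀ i : Int,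
        ((PySem.List.pyRange 0 cols 1).map (fun j =>
          if pvCell grid i j = "@" ∧ x - i = d.1 ∧ y - j = d.2 then (1 : Nat) else 0)).sum
        = if i = x - d.1 ∧ (0 ≤ y - d.2 ∧ y - d.2 < cols ∧ pvCell grid i (y - d.2) = "@") then 1 else 0 := by
      intro i
      rw [show (List.map (fun j =>
          if pvCell grid i j = "@" ∧ x - i = d.1 ∧ y - j = d.2 then (1 : Nat) else 0)
          (PySem.List.pyRange 0 cols 1))
        = List.map (fun j =>
          if j = y - d.2 ∧ (pvCell grid i j = "@" ∧ x - i = d.1) then (1 : Nat) else 0)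
          (PySem.List.pyRange 0 cols 1) from
        List.map_congr_left (fun j _ => if_congr
          (by constructor
              · rintro ⟨hA, hB, hC⟩; exact ⟨by omega, hA, hB⟩
              · rintro ⟨hA, hB, hC⟩; exact ⟨hB, hC, by omega⟩) rfl rfl)]
      rw [pv_sum_pin cols (y - d.2) (fun j => pvCell grid i j = "@" ∧ x - i = d.1)]
      exact if_congr
        (by constructor
            · rintro ⟨hA, hB, hC, hD⟩; exact ⟨by omega, hA, hB, hC⟩
            · rintro ⟨hA, hB, hC, hD⟩; exact ⟨hB, hC, hD, by omega⟩) rfl rfl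
    rw [List.map_congr_left (fun i _ => hinner i)]
    rw [pv_sum_pin rows (x - d.1)
      (fun i => 0 ≤ y - d.2 ∧ y - d.2 < cols ∧ pvCell grid i (y - d.2) = "@")]
  rw [List.map_congr_left (fun d _ => h2 d)]
  rw [show (fun d : Int × Int =>
      if 0 ≤ x - d.1 ∧ x - d.1 < rows ∧ 0 ≤ y - d.2 ∧ y - d.2 < cols ∧
        pvCell grid (x - d.1) (y - d.2) = "@" then (1 : Nat) else 0)
    = (fun d : Int × Int =>
      (fun e : Int × Int =>
        if 0 ≤ x + e.1 ∧ x + e.1 < rows ∧ 0 ≤ y + e.2 ∧ y + e.2 < cols ∧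
          pvCell grid (x + e.1) (y + e.2) = "@" then (1 : Nat) else 0) (-d.1, -d.2)) from
    funext (fun d => by
      have e1 : x + -d.1 = x - d.1 := by ring
      have e2 : y + -d.2 = y - d.2 := by ring
      simp only [e1, e2])]
  rw [pv_sum_neg_dirs (fun e : Int × Int =>
    if 0 ≤ x + e.1 ∧ x + e.1 < rows ∧ 0 ≤ y + e.2 ∧ y + e.2 < cols ∧
      pvCell grid (x + e.1) (y + e.2) = "@" then (1 : Nat) else 0), ← pv_countP_eq_sum]
  refine congrArg List.sum (List.map_congr_left ?_)
  intro d _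
  by_cases h : (0 ≤ x + d.1 ∧ x + d.1 < rows ∧ 0 ≤ y + d.2 ∧ y + d.2 < cols ∧
      pvCell grid (x + d.1) (y + d.2) = "@") <;> simp [h]

-- A's adjacency test computes the countP of pvAdjP
theorem pv_acc (grid : List (List String)) (i j : Int) :
    isAccessible grid i j
      = decide ((((pvDirs.countP (pvAdjP grid (grid.length : Int)
          ((PySem.List.pyGetD grid 0 []).length : Int) i j)) : Int)) < 4) := by
  unfold isAccessible
  rw [show (fun (adj : Int) (d : Int × Int) =>
      if 0 ≤ i + d.1 ∧ i + d.1 < (grid.length : Int) ∧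
         0 ≤ j + d.2 ∧ j + d.2 < ((PySem.List.pyGetD grid 0 []).length : Int) ∧
         pvCell grid (i + d.1) (j + d.2) = "@"
      then adj + 1 else adj)
    = (fun (adj : Int) (d : Int × Int) =>
      if pvAdjP grid (grid.length : Int) ((PySem.List.pyGetD grid 0 []).length : Int) i j d = true
      then adj + 1 else adj) from
    funext (fun adj => funext (fun d => by
      by_cases h : (0 ≤ i + d.1 ∧ i + d.1 < (grid.length : Int) ∧
         0 ≤ j + d.2 ∧ j + d.2 < ((PySem.List.pyGetD grid 0 []).length : Int) ∧
         pvCell grid (i + d.1) (j + d.2) = "@") <;> simp [pvAdjP, h]))]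
  rw [PySem.List.foldl_count_if]
  simp

-- A's double loop as a 0/1 double sum
theorem pv_A_sum (grid : List (List String)) :
    part1 grid
      = ((PySem.List.pyRange 0 (grid.length : Int) 1).map (fun i =>
          ((PySem.List.pyRange 0 ((PySem.List.pyGetD grid 0 []).length : Int) 1).map (fun j =>
            if (!decide (pvCell grid i j = ".") && isAccessible grid i j) = true
            then (1 : Int) else 0)).sum)).sum := by
  unfold part1
  rw [show (fun (acc : Int) (i : Int) =>
      (PySem.List.pyRange 0 ((PySem.List.pyGetD grid 0 []).length : Int) 1).foldl (fun acc j =>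
        if pvCell grid i j = "." then acc
        else if isAccessible grid i j then acc + 1 else acc) acc)
    = (fun (acc : Int) (i : Int) => acc +
        ↑((PySem.List.pyRange 0 ((PySem.List.pyGetD grid 0 []).length : Int) 1).countP
          (fun j => !decide (pvCell grid i j = ".") && isAccessible grid i j))) from
    funext (fun acc => funext (fun i => by
      rw [show (fun (acc : Int) (j : Int) =>
          if pvCell grid i j = "." then acc
          else if isAccessible grid i j then acc + 1 else acc)
        = (fun (acc : Int) (j : Int) =>
          if (!decide (pvCell grid i j = ".") && isAccessible grid i j) = true
          then acc + 1 else acc) from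
        funext (fun acc => funext (fun j => by
          by_cases h1 : pvCell grid i j = "." <;> by_cases h2 : isAccessible grid i j <;>
            simp [h1, h2]))]
      exact PySem.List.foldl_count_if _ _ _))]
  rw [PySem.List.foldl_add]
  rw [zero_add]
  refine congrArg List.sum (List.map_congr_left ?_)
  intro i _
  rw [PySem.List.sum_map_ite_one_zero]

theorem pv_main (grid : List (List String)) (hne : grid ≠ []) :
    part1 grid = part1_alt grid := by
  rw [pv_A_sum, part1_alt, if_neg hne]
  simp only [PySem.Dict.getD_foldl_insert_add_one, PySem.Dict.getD_empty, zero_add]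
  refine congrArg List.sum (List.map_congr_left ?_)
  intro i hi
  refine congrArg List.sum (List.map_congr_left ?_)
  intro j hj
  rw [PySem.List.mem_pyRange_one] at hi hj
  rw [pv_core grid _ _ i j hi.1 hi.2 hj.1 hj.2, pv_acc]
  by_cases h1 : pvCell grid i j = "." <;>
    by_cases h2 : ((pvDirs.countP (pvAdjP grid (grid.length : Int)
      ((PySem.List.pyGetD grid 0 []).length : Int) i j) : Int) < 4) <;>
    simp [h1, h2]

-- ===== VERDICT (by name: the statement is the Claim_ definition above) =====
theorem part1_spec : Claim_equal_part1 := by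
  intro grid _ _
  unfold Spec_part1
  cases grid with
  | nil => rfl
  | cons r rest => exact pv_main (r :: rest) (by simp)
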